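-- pv_equiv track=rewrite | github.com/equang2011/regulatory_api | scripts/data_exploration.py | count_by_type
-- ===== SOURCE A (Python) =====
-- def count_by_type(data):
--     """Returns a count per doc type"""
--     if not data:
--         return {}
--     counter = {}
--     for obj in data:
--         doc_type = obj.get("type", [])
--         if not doc_type:
--             return  # just for safety
--
--         if doc_type not in counter:
--             counter[doc_type] = 1
--         else:
--             counter[doc_type] += 1
--     return counter
-- ===== SOURCE B (Python) =====
-- def count_by_type(data):
--     """Returns a count per doc type"""
--     if not data:
--         return {}
--     types = [obj.get("type", []) for obj in data]
--     if any(not t for t in types):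
--         return None
--     return _tally(types)
--
--
-- def _tally(types):
--     # remove-and-recurse: count the first type by how many elements
--     # filtering it out removes, then recurse on the remainder
--     if not types:
--         return {}
--     head = types[0]
--     rest = [t for t in types if t != head]
--     result = {head: len(types) - len(rest)}
--     result.update(_tally(rest))
--     return result
-- ===== Notes on version B (the rewrite author's own statement) =====
-- stated objective: alternative
-- what changed: Replaces A's single interleaved dict-accumulator loop with staged passes (extract all types, validate with any()) followed by a recursive remove-and-recurse tally: count the first type as the number of elements a filter removes, then recurse on the filtered remainder; no counter dict is ever incremented.
import Mathlib
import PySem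

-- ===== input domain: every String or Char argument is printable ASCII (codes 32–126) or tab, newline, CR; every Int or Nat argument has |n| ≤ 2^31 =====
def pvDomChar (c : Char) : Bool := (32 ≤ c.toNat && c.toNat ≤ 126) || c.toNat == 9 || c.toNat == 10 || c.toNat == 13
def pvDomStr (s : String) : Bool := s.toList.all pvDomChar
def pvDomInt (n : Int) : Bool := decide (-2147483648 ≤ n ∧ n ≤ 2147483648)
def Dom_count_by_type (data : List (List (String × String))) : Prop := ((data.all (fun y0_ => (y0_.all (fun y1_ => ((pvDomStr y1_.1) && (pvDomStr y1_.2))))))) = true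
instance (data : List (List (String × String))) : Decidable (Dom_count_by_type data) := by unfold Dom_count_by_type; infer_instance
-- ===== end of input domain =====

-- B replaces A's single dict-accumulator loop by staged extract/validate passes and a
-- recursive remove-and-recurse tally; objective: alternative algorithm, same values.

-- ===== PORT A =====
-- the 'for obj in data' loop with its early 'return' on a falsy type
def countByTypeLoop : List (List (String × String)) → PySem.Dict String Int → Option (List (String × Int))
  | [], counter => some counter.items
  | obj :: rest, counter =>
    match (PySem.Dict.mk obj).get? "type" with
    | none => none                       -- doc_type = [] (default), falsy → early return None
    | some t =>
      if t = "" then none                -- empty string is falsy too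
      else if counter.contains t = false then countByTypeLoop rest (counter.insert t 1)
      else countByTypeLoop rest (counter.insert t (counter.getD t 0 + 1))

def count_by_type (data : List (List (String × String))) : Option (List (String × Int)) :=
  if data = [] then some []
  else countByTypeLoop data PySem.Dict.empty

-- ===== PORT B =====
-- _tally: count the head type by how many elements filtering it out removes, recurse on the rest
def cbtTally : List String → List (String × Int)
  | [] => []
  | t :: rest =>
    let rem := rest.filter (· != t)
    (t, ((1 + rest.length : Int) - rem.length)) :: cbtTally rem
termination_by l => l.length
decreasing_by
  simpa using Nat.lt_succ_of_le (List.length_filter_le _ rest)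

def count_by_type_alt (data : List (List (String × String))) : Option (List (String × Int)) :=
  if data = [] then some []
  else
    let types := data.map (fun obj => (PySem.Dict.mk obj).getD "type" "")
    if types.any (fun t => t == "") then none
    else some (cbtTally types)

-- ===== PRECONDITION & SPEC =====
def Spec_count_by_type (data : List (List (String × String))) (out : Option (List (String × Int))) : Prop := out = count_by_type_alt data
instance (data : List (List (String × String))) (out : Option (List (String × Int))) : Decidable (Spec_count_by_type data out) := by unfold Spec_count_by_type; infer_instance

-- ===== CLAIM (what is proved, stated in full; the proofs are below) =====
def Claim_equal_count_by_type : Prop := ∀ (data : List (List (String × String))), Dom_count_by_type data → Spec_count_by_type data (count_by_type data)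

-- ===== LEMMAS AND PROOFS =====

-- A's loop, value-wise: none iff some extracted type is falsy, else the items of the counter fold
theorem countByTypeLoop_eq (l : List (List (String × String))) (c : PySem.Dict String Int) :
    countByTypeLoop l c =
      if (l.map (fun obj => (PySem.Dict.mk obj).getD "type" "")).any (fun t => t == "") then none
      else some (((l.map (fun obj => (PySem.Dict.mk obj).getD "type" "")).foldl
        (fun d t => d.insert t (d.getD t 0 + 1)) c).items) := by
  induction l generalizing c with
  | nil => simp [countByTypeLoop]
  | cons obj rest ih =>
    simp only [countByTypeLoop, List.map_cons, List.any_cons, List.foldl_cons]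
    cases hg : (PySem.Dict.mk obj).get? "type" with
    | none => simp [PySem.Dict.getD_of_get?_eq_none _ _ hg]
    | some t =>
      rw [PySem.Dict.getD_of_get?_eq_some _ _ hg]
      by_cases ht : t = ""
      · simp [ht]
      · have hne : (t == "") = false := by simpa using ht
        simp only [hne, Bool.false_or, if_neg ht]
        by_cases hc : c.contains t = false
        · rw [if_pos hc, ih, PySem.Dict.getD_of_not_contains _ _ hc]; norm_num
        · rw [if_neg hc, ih]

-- foldl of Set.add skips elements already in the accumulator
theorem foldl_add_filter (t : String) (l : List String) (acc : List String) (ht : t ∈ acc) :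
    l.foldl PySem.Set.add acc = (l.filter (· != t)).foldl PySem.Set.add acc := by
  induction l generalizing acc with
  | nil => rfl
  | cons x rest ih =>
    by_cases hx : x = t
    · subst hx
      have : PySem.Set.add acc x = acc := by simp [PySem.Set.add, ht]
      simp [this, ih _ ht]
    · have hmem : t ∈ PySem.Set.add acc x := by
        simp [PySem.Set.add]; split <;> simp [ht]
      simp only [List.filter_cons]
      have : (x != t) = true := by simpa using hx
      simp [this, ih _ hmem]

-- a head element absent from the rest of the list stays in front of the Set fold
theorem foldl_add_cons (t : String) (l : List String) (acc : List String) (hl : t ∉ l) :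
    l.foldl PySem.Set.add (t :: acc) = t :: l.foldl PySem.Set.add acc := by
  induction l generalizing acc with
  | nil => rfl
  | cons x rest ih =>
    have hx : x ≠ t := fun h => hl (h ▸ List.mem_cons_self)
    have hstep : PySem.Set.add (t :: acc) x = t :: PySem.Set.add acc x := by
      by_cases hm : x ∈ acc <;> simp [PySem.Set.add, hx, hm]
    simp only [List.foldl_cons, hstep]
    exact ih _ (fun h => hl (List.mem_cons_of_mem _ h))

theorem ofList_cons_filter (t : String) (rest : List String) :
    PySem.Set.ofList (t :: rest) = t :: PySem.Set.ofList (rest.filter (· != t)) := by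
  have h1 : PySem.Set.ofList (t :: rest) = rest.foldl PySem.Set.add [t] := by
    simp [PySem.Set.ofList, PySem.Set.add]
  have h2 : rest.foldl PySem.Set.add [t] = (rest.filter (· != t)).foldl PySem.Set.add [t] :=
    foldl_add_filter t rest [t] (by simp)
  have h3 : t ∉ rest.filter (· != t) := by simp
  have h4 : (rest.filter (· != t)).foldl PySem.Set.add [t]
      = t :: (rest.filter (· != t)).foldl PySem.Set.add [] :=
    foldl_add_cons t _ [] h3
  rw [h1, h2, h4]; rfl

-- the remove-and-recurse tally computes exactly Counter(types).items()
theorem cbtTally_eq (l : List String) :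
    cbtTally l = (PySem.Set.ofList l).map (fun t => (t, (l.count t : Int))) := by
  induction hl : l.length using Nat.strong_induction_on generalizing l with
  | _ n ih =>
    cases l with
    | nil => simp [cbtTally]
    | cons t rest =>
      have hrem : (rest.filter (· != t)).length < n := by
        subst hl
        simpa using Nat.lt_succ_of_le (List.length_filter_le _ rest)
      rw [cbtTally, ih _ hrem _ rfl, ofList_cons_filter]
      simp only [List.map_cons]
      congr 1
      · -- head pair: the count of t
        simp only [List.count_cons_self, Prod.mk.injEq, true_and]
        have hpred : (fun a => decide ¬((a != t) = true)) = (fun a : String => a == t) := by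
          funext x; cases h : x == t
          · simpa using (by simpa using h : ¬ x = t)
          · simpa using (by simpa using h : x = t)
        have h1 := List.length_eq_countP_add_countP (p := (· != t)) (l := rest)
        rw [hpred] at h1
        have h2 : List.countP (fun x => x != t) rest = (rest.filter (· != t)).length :=
          List.countP_eq_length_filter
        have h3 : List.countP (fun a => a == t) rest = rest.count t := rfl
        push_cast
        omega
      · -- tail: counts over rem equal counts over t :: rest for its members
        apply List.map_congr_left
        intro k hk
        have hkrem : k ∈ List.filter (fun x => x != t) rest := by
          rwa [PySem.Set.mem_ofList] at hk
        have hkne : k ≠ t := by simpa using List.of_mem_filter hkrem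
        have hcount : (rest.filter (· != t)).count k = rest.count k :=
          List.count_filter (by simpa using hkne)
        simp [hcount, Ne.symm hkne]

-- ===== VERDICT (by name: the statement is the Claim_ definition above) =====

theorem count_by_type_spec : Claim_equal_count_by_type := by
  intro data _
  unfold Spec_count_by_type count_by_type count_by_type_alt
  by_cases hd : data = []
  · simp [hd]
  · simp only [if_neg hd]
    rw [countByTypeLoop_eq]
    by_cases h : (data.map (fun obj => (PySem.Dict.mk obj).getD "type" "")).any (fun t => t == "")
    · simp [h]
    · simp only [h, if_neg, Bool.false_eq_true, not_false_eq_true]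
      rw [PySem.Dict.foldl_insert_getD_add_one_eq_counter, PySem.Dict.items_counter, cbtTally_eq]
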